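-- pv_equiv track=rewrite | github.com/loki0b/intro-programming | intro-programming/06-tuples_dict/221L6Q3.py | iguais
-- ===== SOURCE A (Python) =====
-- def iguais(dicionario):
--     resposta = False
--     for chave, valor in dicionario.items():
--         if valor != 0:
--
--             return resposta
--
--     else:
--         resposta = True
--
--         return resposta
-- ===== SOURCE B (Python) =====
-- def iguais(dicionario):
--     valores = list(dicionario.values())
--     return valores.count(0) == len(valores)
-- ===== Notes on version B (the rewrite author's own statement) =====
-- stated objective: alternative
-- what changed: Replaced the early-return scan over items with a counting formulation: materialise the values, count the zeros, and return whether that count equals the number of entries.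
import Mathlib
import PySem

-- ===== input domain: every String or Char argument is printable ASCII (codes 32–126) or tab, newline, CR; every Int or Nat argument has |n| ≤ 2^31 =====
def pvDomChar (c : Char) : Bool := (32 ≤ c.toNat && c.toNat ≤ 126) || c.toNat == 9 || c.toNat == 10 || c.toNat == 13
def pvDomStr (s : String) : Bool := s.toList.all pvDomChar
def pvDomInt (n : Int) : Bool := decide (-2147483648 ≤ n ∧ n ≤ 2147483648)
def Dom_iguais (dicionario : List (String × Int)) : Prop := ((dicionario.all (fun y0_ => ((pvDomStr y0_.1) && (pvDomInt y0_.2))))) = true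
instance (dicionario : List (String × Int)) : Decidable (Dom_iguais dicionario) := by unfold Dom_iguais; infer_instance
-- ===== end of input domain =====

-- B replaces A's early-return scan with a counting formulation: count the zero values and compare with the number of entries (alternative, same cost).


-- ===== PORT A =====
-- A: scan the items; on the first nonzero value return False; if the loop completes, True.
def iguais (dicionario : List (String × Int)) : Bool :=
  match dicionario with
  | [] => true
  | (_, valor) :: rest => if valor ≠ 0 then false else iguais rest

-- ===== PORT B =====
-- B: valores = list(dicionario.values()); valores.count(0) == len(valores)
def iguais_alt (dicionario : List (String × Int)) : Bool :=
  let valores := dicionario.map Prod.snd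
  PySem.List.count valores (0 : Int) == valores.length

-- ===== PRECONDITION & SPEC =====
def Spec_iguais (dicionario : List (String × Int)) (out : Bool) : Prop := out = iguais_alt dicionario
instance (dicionario : List (String × Int)) (out : Bool) : Decidable (Spec_iguais dicionario out) := by unfold Spec_iguais; infer_instance

-- ===== CLAIM (what is proved, stated in full; the proofs are below) =====
def Claim_equal_iguais : Prop := ∀ (dicionario : List (String × Int)), Dom_iguais dicionario → Spec_iguais dicionario (iguais dicionario)

-- ===== LEMMAS AND PROOFS =====

-- ===== VERDICT (by name: the statement is the Claim_ definition above) =====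
lemma iguais_eq_count (d : List (String × Int)) :
    iguais d = (PySem.List.count (d.map Prod.snd) (0 : Int) == (d.map Prod.snd).length) := by
  induction d with
  | nil => rfl
  | cons p rest ih =>
    obtain ⟨k, v⟩ := p
    by_cases h : v = 0
    · simpa [iguais, h, PySem.List.count_eq, List.count_cons] using ih
    · have hle : (rest.map Prod.snd).count (0 : Int) ≤ rest.length :=
        le_trans List.count_le_length (by simp)
      simp [iguais, h, PySem.List.count_eq, List.length_map]
      omega

theorem iguais_spec : Claim_equal_iguais := by
  intro d _
  unfold Spec_iguais iguais_alt
  exact iguais_eq_count d
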